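-- pv_equiv track=rewrite | github.com/soulless9607/Prueba-Habi | ArrayMange.py | ordenar_bloques
-- ===== SOURCE A (Python) =====
-- from typing import Tuple, List, Union
--
-- EMPTY_BLOCK_MARKER = 'X'
--
-- BLOCK_SEPARATOR = ' '
--
-- def ordenar_bloques(number_sequence: Tuple[int, ...]) -> str:
--     if not isinstance(number_sequence, tuple):
--         raise TypeError("El Input debe ser una tupla")
--     if not all(isinstance(x, int) for x in number_sequence):
--         raise ValueError("Todos los elementos deben ser enteros")
--
--     bloque_actual = []
--     bloques_ordenados = []
--
--     for numero in number_sequence: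
--         # Si el número es un cero, significa que hemos terminado un bloque.
--         if numero == 0:
--             # Ordenamos el bloque actual
--             bloque_actual.sort()
--
--             if not bloque_actual:
--                 bloques_ordenados.append(EMPTY_BLOCK_MARKER)
--             else:
--                 # Convertimos cada número a string y los unimos
--                 bloques_ordenados.append("".join(map(str, bloque_actual)))
--
--             # Reiniciamos el bloque actual para el próximo ciclo
--             bloque_actual = []
--         else:
--             # Si el número no es cero, lo añadimos al bloque actual
--             bloque_actual.append(numero)
--
--     bloque_actual.sort()
--     if not bloque_actual:
--         bloques_ordenados.append(EMPTY_BLOCK_MARKER)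
--     else:
--         bloques_ordenados.append("".join(map(str, bloque_actual)))
--
--     return BLOCK_SEPARATOR.join(bloques_ordenados)
-- ===== SOURCE B (Python) =====
-- from typing import Tuple
--
-- EMPTY_BLOCK_MARKER = 'X'
-- BLOCK_SEPARATOR = ' '
--
-- def ordenar_bloques(number_sequence: Tuple[int, ...]) -> str:
--     if not isinstance(number_sequence, tuple):
--         raise TypeError("El Input debe ser una tupla")
--     if not all(isinstance(x, int) for x in number_sequence):
--         raise ValueError("Todos los elementos deben ser enteros")
--
--     # Separator-index decomposition: find the zero positions, then slice
--     # out each block between consecutive separators (with sentinel bounds).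
--     zero_positions = [i for i, v in enumerate(number_sequence) if v == 0]
--     bounds = [-1] + zero_positions + [len(number_sequence)]
--     parts = []
--     for a, b in zip(bounds, bounds[1:]):
--         block = sorted(number_sequence[a + 1:b])
--         parts.append("".join(map(str, block)) if block else EMPTY_BLOCK_MARKER)
--     return BLOCK_SEPARATOR.join(parts)
-- ===== Notes on version B (the rewrite author's own statement) =====
-- stated objective: alternative
-- what changed: B replaces A's incremental block accumulator with duplicated post-loop final-block handling by a separator-index decomposition: it collects the zero positions, then slices each block out between consecutive separator positions (sentinel bounds -1 and len), sorting and formatting each slice.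
import Mathlib
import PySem

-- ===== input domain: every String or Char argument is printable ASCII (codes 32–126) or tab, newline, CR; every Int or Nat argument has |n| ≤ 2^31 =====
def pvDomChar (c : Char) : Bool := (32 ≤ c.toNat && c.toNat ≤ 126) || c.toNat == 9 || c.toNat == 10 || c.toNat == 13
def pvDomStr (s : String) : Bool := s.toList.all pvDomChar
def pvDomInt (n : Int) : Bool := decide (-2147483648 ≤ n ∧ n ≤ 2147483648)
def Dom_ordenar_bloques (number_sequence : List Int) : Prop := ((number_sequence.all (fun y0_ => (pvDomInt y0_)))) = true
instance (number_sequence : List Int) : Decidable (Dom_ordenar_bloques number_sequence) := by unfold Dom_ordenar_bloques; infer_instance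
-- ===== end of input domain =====

-- B replaces A's incremental block accumulator (with its duplicated post-loop
-- final-block handling) by a separator-index decomposition: collect the zero
-- positions, slice the blocks out between consecutive separators, format each.
-- Objective: alternative decomposition; same exact output.

-- ===== PORT A =====
-- format one finished block: sort it, then 'X' if empty else ''.join(map(str, block))
def pvFmtA (b : List Int) : String :=
  let s := PySem.List.sorted b (fun x => x) false
  if s = [] then "X" else PySem.Str.join "" (s.map PySem.Int.toStr)

-- loop body of A: state = (bloque_actual, bloques_ordenados)
def pvStepA (st : List Int × List String) (numero : Int) : List Int × List String :=
  if numero = 0 then ([], st.2 ++ [pvFmtA st.1])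
  else (st.1 ++ [numero], st.2)

def ordenar_bloques (number_sequence : List Int) : String :=
  let st := number_sequence.foldl pvStepA ([], [])
  PySem.Str.join " " (st.2 ++ [pvFmtA st.1])

-- ===== PORT B =====
def ordenar_bloques_alt (number_sequence : List Int) : String :=
  let zero_positions : List Int :=
    ((PySem.List.enumerate number_sequence 0).filter (fun p => p.2 == 0)).map (·.1)
  let bounds : List Int := [-1] ++ zero_positions ++ [(number_sequence.length : Int)]
  let parts := (bounds.zip bounds.tail).map (fun ab =>
    let block := PySem.List.sorted
      (PySem.List.slice number_sequence (some (ab.1 + 1)) (some ab.2)) (fun x => x) false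
    if block ≠ [] then PySem.Str.join "" (block.map PySem.Int.toStr) else "X")
  PySem.Str.join " " parts

-- ===== PRECONDITION & SPEC =====
def Spec_ordenar_bloques (number_sequence : List Int) (out : String) : Prop := out = ordenar_bloques_alt number_sequence
instance (number_sequence : List Int) (out : String) : Decidable (Spec_ordenar_bloques number_sequence out) := by unfold Spec_ordenar_bloques; infer_instance

-- ===== CLAIM (what is proved, stated in full; the proofs are below) =====
def Claim_equal_ordenar_bloques : Prop := ∀ (number_sequence : List Int), Dom_ordenar_bloques number_sequence → Spec_ordenar_bloques number_sequence (ordenar_bloques number_sequence)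

-- ===== LEMMAS AND PROOFS =====

/-- Reference block decomposition: split the list at zeros (blocks unsorted). -/
def pvBlocks : List Int → List (List Int)
  | [] => [[]]
  | x :: t => if x = 0 then [] :: pvBlocks t
              else match pvBlocks t with
                   | [] => [[x]]
                   | b :: bs => (x :: b) :: bs

lemma pvBlocks_ne_nil (xs : List Int) : pvBlocks xs ≠ [] := by
  cases xs with
  | nil => simp [pvBlocks]
  | cons x t =>
    simp only [pvBlocks]
    split
    · simp
    · split <;> simp

/-- Zero positions of a list, numbering from `s`. -/
def pvZP : List Int → Int → List Int
  | [], _ => []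
  | x :: t, s => if x = 0 then s :: pvZP t (s + 1) else pvZP t (s + 1)

lemma pvZP_eq (xs : List Int) (s : Int) :
    ((PySem.List.enumerate xs s).filter (fun p => p.2 == 0)).map (·.1) = pvZP xs s := by
  induction xs generalizing s with
  | nil => simp [pvZP, PySem.List.enumerate_nil]
  | cons x t ih =>
    simp only [PySem.List.enumerate_cons, List.filter_cons, pvZP]
    by_cases h : x = 0 <;> simp [h, ih]

lemma pvZP_shift (xs : List Int) (s : Int) :
    pvZP xs (s + 1) = (pvZP xs s).map (· + 1) := by
  induction xs generalizing s with
  | nil => simp [pvZP]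
  | cons x t ih =>
    by_cases h : x = 0 <;> simp [pvZP, h, ih]

lemma pvZP_nonneg (xs : List Int) (s : Int) : ∀ y ∈ pvZP xs s, s ≤ y := by
  induction xs generalizing s with
  | nil => simp [pvZP]
  | cons x t ih =>
    intro y hy
    by_cases h : x = 0 <;> simp [pvZP, h] at hy
    · rcases hy with rfl | hy
      · omega
      · have := ih (s + 1) y hy; omega
    · have := ih (s + 1) y hy; omega

/-- Shifting a slice with nonnegative bounds past a cons. -/
lemma pvSlice_shift (x : Int) (t : List Int) (i j : Int) (hi : 0 ≤ i) (hj : 0 ≤ j) :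
    PySem.List.slice (x :: t) (some (i + 1)) (some (j + 1)) =
    PySem.List.slice t (some i) (some j) := by
  rw [PySem.List.slice_toNat (ha := by omega) (hb := by omega),
      PySem.List.slice_toNat (ha := hi) (hb := hj)]
  have h1 : (i + 1).toNat = i.toNat + 1 := by omega
  have h2 : (j + 1).toNat = j.toNat + 1 := by omega
  simp [h1, h2]

lemma pvSlice_zero_succ (x : Int) (t : List Int) (j : Int) (hj : 0 ≤ j) :
    PySem.List.slice (x :: t) none (some (j + 1)) =
    x :: PySem.List.slice t none (some j) := by
  rw [PySem.List.slice_to (hb := by omega), PySem.List.slice_to (hb := hj)]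
  have h2 : (j + 1).toNat = j.toNat + 1 := by omega
  simp [h2]

def pvSliceOf (xs : List Int) (ab : Int × Int) : List Int :=
  PySem.List.slice xs (some (ab.1 + 1)) (some ab.2)

def pvPairs (l : List Int) : List (Int × Int) := l.zip l.tail

lemma pvPairs_map_shift (l : List Int) :
    pvPairs (l.map (· + 1)) = (pvPairs l).map (fun ab => (ab.1 + 1, ab.2 + 1)) := by
  unfold pvPairs
  rw [← List.map_tail, List.zip_map]
  rfl

lemma pvMap_shift (x : Int) (t : List Int) (l : List Int)
    (h1 : ∀ a ∈ l, -1 ≤ a) (h2 : ∀ b ∈ l.tail, 0 ≤ b) :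
    ((pvPairs (l.map (· + 1))).map (pvSliceOf (x :: t))) = (pvPairs l).map (pvSliceOf t) := by
  rw [pvPairs_map_shift, List.map_map]
  apply List.map_congr_left
  intro ab hab
  rcases ab with ⟨a, b⟩
  have ha : a ∈ l := (List.of_mem_zip hab).1
  have hb : b ∈ l.tail := (List.of_mem_zip hab).2
  simp only [Function.comp, pvSliceOf]
  have := pvSlice_shift x t (a + 1) b (by have := h1 a ha; omega) (h2 b hb)
  simpa using this

/-- The slice decomposition equals the reference block decomposition. -/
lemma pvSlices_eq (xs : List Int) :
    ((pvPairs ([-1] ++ pvZP xs 0 ++ [(xs.length : Int)])).map (pvSliceOf xs)) = pvBlocks xs := by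
  induction xs with
  | nil => simp [pvZP, pvPairs, pvBlocks, pvSliceOf, PySem.List.slice]
  | cons x t ih =>
    have hsh : pvZP t 1 = (pvZP t 0).map (· + 1) := by
      have := pvZP_shift t 0; simpa using this
    have hnn : ∀ y ∈ pvZP t 0, (0 : Int) ≤ y := pvZP_nonneg t 0
    by_cases hx : x = 0
    · subst hx
      have hb : ([-1] ++ pvZP (0 :: t) 0 ++ [(((0 :: t).length : Nat) : Int)])
          = -1 :: (([-1] ++ pvZP t 0 ++ [((t.length : Nat) : Int)]).map (· + 1)) := by
        simp [pvZP, hsh]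
      rw [hb]
      have hLm : (([-1] ++ pvZP t 0 ++ [((t.length : Nat) : Int)]).map (· + 1))
          = 0 :: ((pvZP t 0 ++ [((t.length : Nat) : Int)]).map (· + 1)) := by
        simp
      have hpp : pvPairs (-1 :: (([-1] ++ pvZP t 0 ++ [((t.length : Nat) : Int)]).map (· + 1)))
          = (-1, 0) :: pvPairs (([-1] ++ pvZP t 0 ++ [((t.length : Nat) : Int)]).map (· + 1)) := by
        rw [hLm]; rfl
      rw [hpp, List.map_cons]
      have hfirst : pvSliceOf (0 :: t) (-1, 0) = [] := by
        simp only [pvSliceOf]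
        norm_num
        rw [PySem.List.slice_to (hb := le_refl 0)]
        simp
      rw [hfirst]
      rw [pvMap_shift 0 t _ ?h1 ?h2]
      case h1 =>
        intro a ha
        simp at ha
        rcases ha with rfl | ha | rfl
        · omega
        · have := hnn a ha; omega
        · omega
      case h2 =>
        intro b hbm
        simp at hbm
        rcases hbm with hbm | rfl
        · exact hnn b hbm
        · omega
      rw [ih]
      simp [pvBlocks]
    · have hb : ([-1] ++ pvZP (x :: t) 0 ++ [(((x :: t).length : Nat) : Int)])
          = -1 :: ((pvZP t 0 ++ [((t.length : Nat) : Int)]).map (· + 1)) := by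
        simp [pvZP, hx, hsh]
      rw [hb]
      rcases hz : pvZP t 0 with _ | ⟨c, cs⟩
      · -- no zeros in t
        have hfull : PySem.List.slice t none (some ((t.length : Nat) : Int)) = t := by
          rw [PySem.List.slice_to (hb := Int.natCast_nonneg _)]; simp
        simp only [List.nil_append]
        rw [show (([((t.length : Nat) : Int)]).map (· + 1)) = [((t.length : Nat) : Int) + 1] from rfl]
        rw [show pvPairs (-1 :: [((t.length : Nat) : Int) + 1]) = [(-1, ((t.length : Nat) : Int) + 1)] from rfl,
            List.map_cons]
        have hfst : pvSliceOf (x :: t) (-1, ((t.length : Nat) : Int) + 1) = x :: t := by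
          simp only [pvSliceOf]
          norm_num
          rw [pvSlice_zero_succ x t _ (Int.natCast_nonneg _), hfull]
        rw [hfst]
        have hih := ih
        simp only [hz, List.append_nil] at hih
        rw [show pvPairs ([-1] ++ [((t.length : Nat) : Int)]) = [(-1, ((t.length : Nat) : Int))] from rfl] at hih
        simp only [List.map_cons, List.map_nil, pvSliceOf] at hih
        norm_num [hfull] at hih
        simp [pvBlocks, hx, ← hih]
      · have hc : (0 : Int) ≤ c := hnn c (by rw [hz]; exact List.mem_cons_self)
        have hRm : ((c :: cs ++ [((t.length : Nat) : Int)]).map (· + 1))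
            = (c + 1) :: ((cs ++ [((t.length : Nat) : Int)]).map (· + 1)) := by simp
        have hpp : pvPairs (-1 :: ((c :: cs ++ [((t.length : Nat) : Int)]).map (· + 1)))
            = (-1, c + 1) :: pvPairs ((c :: cs ++ [((t.length : Nat) : Int)]).map (· + 1)) := by
          rw [hRm]; rfl
        rw [hpp, List.map_cons]
        have hfst : pvSliceOf (x :: t) (-1, c + 1)
            = x :: PySem.List.slice t none (some c) := by
          simp only [pvSliceOf]
          norm_num
          exact pvSlice_zero_succ x t c hc
        rw [hfst]
        rw [pvMap_shift x t _ ?h1 ?h2]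
        case h1 =>
          intro a ha
          simp at ha
          rcases ha with rfl | ha | rfl
          · omega
          · have := hnn a (hz ▸ List.mem_cons_of_mem _ ha); omega
          · omega
        case h2 =>
          intro b hbm
          simp at hbm
          rcases hbm with hbm | rfl
          · have := hnn b (hz ▸ List.mem_cons_of_mem _ hbm); omega
          · omega
        have hih := ih
        simp only [hz] at hih
        rw [show pvPairs ([-1] ++ c :: cs ++ [((t.length : Nat) : Int)])
            = (-1, c) :: pvPairs (c :: cs ++ [((t.length : Nat) : Int)]) from rfl,
           List.map_cons] at hih
        have hfstL : pvSliceOf t (-1, c) = PySem.List.slice t none (some c) := by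
          simp only [pvSliceOf]; norm_num
        rw [hfstL] at hih
        simp only [pvBlocks, if_neg hx, ← hih]

lemma pvFoldA (xs : List Int) : ∀ (cur : List Int) (acc : List String),
    (xs.foldl pvStepA (cur, acc)).2 ++ [pvFmtA (xs.foldl pvStepA (cur, acc)).1] =
    acc ++ (match pvBlocks xs with
            | [] => []
            | b :: bs => (cur ++ b) :: bs).map pvFmtA := by
  induction xs with
  | nil => intro cur acc; simp [pvBlocks]
  | cons x t ih =>
    intro cur acc
    by_cases h : x = 0
    · subst h
      simp only [List.foldl_cons, pvStepA]
      rw [ih]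
      rcases hbt : pvBlocks t with _ | ⟨b, bs⟩
      · exact absurd hbt (pvBlocks_ne_nil t)
      · simp [pvBlocks, hbt]
    · simp only [List.foldl_cons, pvStepA, if_neg h]
      rw [ih]
      rcases hbt : pvBlocks t with _ | ⟨b, bs⟩
      · exact absurd hbt (pvBlocks_ne_nil t)
      · simp [pvBlocks, h, hbt]

-- ===== VERDICT (by name: the statement is the Claim_ definition above) =====
lemma pvA_eq (xs : List Int) :
    ordenar_bloques xs = PySem.Str.join " " ((pvBlocks xs).map pvFmtA) := by
  simp only [ordenar_bloques]
  have h := pvFoldA xs [] []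
  simp only [List.nil_append] at h
  rw [h]
  rcases hbt : pvBlocks xs with _ | ⟨b, bs⟩
  · exact absurd hbt (pvBlocks_ne_nil xs)
  · simp

lemma pvB_eq (xs : List Int) :
    ordenar_bloques_alt xs = PySem.Str.join " " ((pvBlocks xs).map pvFmtA) := by
  have key : (pvPairs ([-1] ++ pvZP xs 0 ++ [(xs.length : Int)])).map
        (fun ab => pvFmtA (pvSliceOf xs ab)) = (pvBlocks xs).map pvFmtA := by
    rw [show (fun ab => pvFmtA (pvSliceOf xs ab)) = pvFmtA ∘ pvSliceOf xs from rfl,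
        ← List.map_map, pvSlices_eq]
  have hfn : (fun ab : Int × Int =>
      let block := PySem.List.sorted
        (PySem.List.slice xs (some (ab.1 + 1)) (some ab.2)) (fun x => x) false
      if block ≠ [] then PySem.Str.join "" (block.map PySem.Int.toStr) else "X")
      = fun ab => pvFmtA (pvSliceOf xs ab) := by
    funext ab
    simp only [pvFmtA, pvSliceOf, ne_eq, ite_not]
  simp only [ordenar_bloques_alt]
  rw [pvZP_eq xs 0]
  simp only [hfn]
  exact congrArg (PySem.Str.join " ") key

theorem ordenar_bloques_spec : Claim_equal_ordenar_bloques := by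
  intro xs _
  unfold Spec_ordenar_bloques
  rw [pvA_eq, pvB_eq]
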